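-- pv_equiv track=rewrite | github.com/ed2k/cookbook4python | trunk/makoshell/handyscripts.py | bytes16To8hex
-- ===== SOURCE A (Python) =====
-- def bytes16To8hex(data):
--     lines = data.splitlines()
--     r = lines[0].split('  ')[0].split()
--     if len(lines)>1:
--         for line in lines[1:]:
--             r += line[7:].split('  ')[0].split()
--
--     i = 1
--     line = []
--     lines = []
--     for b in r:
--         if i > 8:
--             i = 1
--             lines.append(' '*5+', '.join(line)+',')
--             line = []
--         line.append('0x'+b)
--         i += 1
--     if i > 1:
--         lines.append(' '*5+', '.join(line))
--     return '\n'.join(lines)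
-- ===== SOURCE B (Python) =====
-- def bytes16To8hex(data):
--     tokens = []
--     for idx, line in enumerate(data.splitlines()):
--         part = line if idx == 0 else line[7:]
--         tokens.extend(part.split('  ')[0].split())
--     rows = []
--     rest = tokens
--     while rest:
--         chunk, rest = rest[:8], rest[8:]
--         rows.append(' ' * 5 + ', '.join('0x' + b for b in chunk))
--     return ',\n'.join(rows)
-- ===== Notes on version B (the rewrite author's own statement) =====
-- stated objective: simpler
-- what changed: Replaces the counter/flush/trailing-comma accumulator loop by explicit chunking (slice off 8 tokens at a time into comma-free rows) joined with a comma-plus-newline separator, and folds the two-phase first-line/other-lines parsing into one enumerate pass.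
-- outside the precondition, e.g. on bytes16To8hex(''): A raises IndexError, B returns ''
import Mathlib
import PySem

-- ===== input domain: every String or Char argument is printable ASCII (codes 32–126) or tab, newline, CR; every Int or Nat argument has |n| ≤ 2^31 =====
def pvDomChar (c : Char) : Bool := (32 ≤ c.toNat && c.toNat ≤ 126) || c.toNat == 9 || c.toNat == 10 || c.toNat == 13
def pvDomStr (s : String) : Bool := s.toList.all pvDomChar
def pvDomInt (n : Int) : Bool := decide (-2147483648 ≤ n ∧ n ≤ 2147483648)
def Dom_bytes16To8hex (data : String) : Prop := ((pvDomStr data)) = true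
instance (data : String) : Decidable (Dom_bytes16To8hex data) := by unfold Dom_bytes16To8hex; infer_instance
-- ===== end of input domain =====

-- B replaces A's counter/flush accumulator loop by slicing 8 tokens per row and joining rows with ",\n",
-- and merges the first-line/other-lines parsing into one enumerate pass (objective: simpler; same O(n) cost).


-- ===== PORT A =====
-- line.split('  ')[0]  (split? with the non-empty separator "  " always returns a non-empty list,
-- so the [0] indexing never raises; the getD defaults are unreachable)
def pvFieldA (s : String) : String := ((PySem.Str.split? s "  ").getD [])[0]?.getD ""

-- the body of A's grouping loop: state (i, line, lines)
def pvStepA (st : Int × List String × List String) (b : String) : Int × List String × List String :=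
  if st.1 > 8 then
    (2, ["0x" ++ b], st.2.2 ++ ["     " ++ PySem.Str.join ", " st.2.1 ++ ","])
  else
    (st.1 + 1, st.2.1 ++ ["0x" ++ b], st.2.2)

def bytes16To8hex (data : String) : String :=
  let ls := PySem.Str.splitlines data
  match PySem.List.pyGet? ls 0 with
  | none => ""   -- lines[0] raises IndexError here (data = ""); excluded by Pre_
  | some l0 =>
    let r := PySem.Str.split₀ (pvFieldA l0)
    let r := if ls.length > 1 then
        (PySem.List.slice ls (some 1) none).foldl
          (fun acc line => acc ++ PySem.Str.split₀ (pvFieldA (PySem.Str.slice line (some 7) none))) r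
      else r
    let st := r.foldl pvStepA (1, [], [])
    let lns := if st.1 > 1 then st.2.2 ++ ["     " ++ PySem.Str.join ", " st.2.1] else st.2.2
    PySem.Str.join "\n" lns

-- ===== PORT B =====
-- part.split('  ')[0]  (same remark: the non-empty separator makes the defaults unreachable)
def pvFieldB (s : String) : String := ((PySem.Str.split? s "  ").getD [])[0]?.getD ""

-- the while-loop of B: slice off 8 tokens at a time, one comma-free row per chunk
def pvRowsB (rest : List String) : List String :=
  if rest = [] then []
  else
    ("     " ++ PySem.Str.join ", " ((PySem.List.slice rest none (some 8)).map (fun b => "0x" ++ b)))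
      :: pvRowsB (PySem.List.slice rest (some 8) none)
termination_by rest.length
decreasing_by
  rw [show ((8 : Int)) = ((8 : Nat) : Int) by norm_num, PySem.List.slice_from_natCast]
  simp only [List.length_drop]
  have : rest.length ≠ 0 := by simpa using ‹¬ rest = []›
  omega

def bytes16To8hex_alt (data : String) : String :=
  let tokens := (PySem.List.enumerate (PySem.Str.splitlines data) 0).flatMap
    (fun p => PySem.Str.split₀ (pvFieldB (if p.1 = 0 then p.2 else PySem.Str.slice p.2 (some 7) none)))
  PySem.Str.join ",\n" (pvRowsB tokens)

-- ===== PRECONDITION & SPEC =====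
-- A raises IndexError exactly when data.splitlines() is empty, i.e. on data = "" only.
def Pre_bytes16To8hex (data : String) : Prop := PySem.Str.splitlines data ≠ []
instance (data : String) : Decidable (Pre_bytes16To8hex data) := by unfold Pre_bytes16To8hex; infer_instance
def pvWitness_bytes16To8hex : String := "00 11  comment"

def Spec_bytes16To8hex (data : String) (out : String) : Prop := out = bytes16To8hex_alt data
instance (data : String) (out : String) : Decidable (Spec_bytes16To8hex data out) := by unfold Spec_bytes16To8hex; infer_instance

-- ===== CLAIM (what is proved, stated in full; the proofs are below) =====
def Claim_equal_bytes16To8hex : Prop := ∀ (data : String), Dom_bytes16To8hex data → Pre_bytes16To8hex data → Spec_bytes16To8hex data (bytes16To8hex data)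

-- ===== LEMMAS AND PROOFS =====

-- interleave the "all rows but the last get a trailing comma" rule into a row list
def pvAddCommas : List String → List String
  | [] => []
  | [x] => [x]
  | x :: y :: t => (x ++ ",") :: pvAddCommas (y :: t)

-- one comma-free row out of a chunk of tokens
def pvRow (c : List String) : String := "     " ++ PySem.Str.join ", " (c.map (fun b => "0x" ++ b))

theorem pvRowsB_nil : pvRowsB [] = [] := by
  rw [pvRowsB]; simp

theorem pvRowsB_cons (r : List String) (h : r ≠ []) :
    pvRowsB r = pvRow (r.take 8) :: pvRowsB (r.drop 8) := by
  rw [pvRowsB]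
  have h8 : ((8 : Int)) = ((8 : Nat) : Int) := by norm_num
  rw [if_neg h, h8, PySem.List.slice_from_natCast, PySem.List.slice_to_natCast, pvRow]

theorem pvRowsB_ne_nil (r : List String) (h : r ≠ []) : pvRowsB r ≠ [] := by
  rw [pvRowsB_cons r h]; simp

-- joining comma-suffixed rows with "\n" is joining plain rows with ",\n"
theorem pvAddCommas_ne_nil (xs : List String) (h : xs ≠ []) : pvAddCommas xs ≠ [] := by
  cases xs with
  | nil => exact absurd rfl h
  | cons x t => cases t <;> simp [pvAddCommas]

theorem join_addCommas (xs : List String) :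
    PySem.Str.join "\n" (pvAddCommas xs) = PySem.Str.join ",\n" xs := by
  induction xs with
  | nil => rfl
  | cons x t ih =>
    cases t with
    | nil => rfl
    | cons y t' =>
      obtain ⟨z, zs, hzs⟩ : ∃ z zs, pvAddCommas (y :: t') = z :: zs := by
        cases h : pvAddCommas (y :: t') with
        | nil => exact absurd h (pvAddCommas_ne_nil _ (by simp))
        | cons z zs => exact ⟨z, zs, rfl⟩
      apply String.toList_inj.mp
      have hih := congrArg String.toList ih
      rw [PySem.Str.toList_join, PySem.Str.toList_join, hzs] at hih
      rw [show pvAddCommas (x :: y :: t') = (x ++ ",") :: pvAddCommas (y :: t') from rfl, hzs]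
      rw [PySem.Str.toList_join, PySem.Str.toList_join]
      simp only [List.map_cons] at hih
      simp only [List.map_cons, PySem.Chars.join_cons_cons, String.toList_append]
      rw [← hih]
      have hlit : (",":String).toList ++ ("\n":String).toList = (",\n":String).toList := by decide
      rw [← hlit]
      simp [List.append_assoc]

-- A's loop over a short chunk just accumulates prefixed tokens
theorem foldl_stepA_small (c : List String) :
    ∀ (j : Int) (line lns : List String), 1 ≤ j → j + c.length ≤ 9 →
    c.foldl pvStepA (j, line, lns) = (j + c.length, line ++ c.map (fun b => "0x" ++ b), lns) := by
  induction c with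
  | nil => intro j line lns _ _; simp
  | cons b c ih =>
    intro j line lns h1 h2
    simp only [List.length_cons] at h2
    have hj : ¬ (j > 8) := by omega
    have hstep : pvStepA (j, line, lns) b = (j + 1, line ++ ["0x" ++ b], lns) := by
      simp only [pvStepA]; rw [if_neg hj]
    simp only [List.foldl_cons, hstep]
    rw [ih (j + 1) (line ++ ["0x" ++ b]) lns (by omega) (by push_cast at h2 ⊢; omega)]
    have hlen : j + 1 + (c.length : Int) = j + ((c.length + 1 : Nat) : Int) := by push_cast; ring
    simp [hlen, List.append_assoc]

-- after 8 tokens a 9th token flushes: restart from a fresh state with the comma row appended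
theorem foldl_stepA_flush (r : List String) (lns : List String) (h : 8 < r.length) :
    r.foldl pvStepA (1, [], lns) =
      (r.drop 8).foldl pvStepA (1, [], lns ++ [pvRow (r.take 8) ++ ","]) := by
  have hsplit : r = r.take 8 ++ r.drop 8 := (List.take_append_drop 8 r).symm
  conv_lhs => rw [hsplit]
  rw [List.foldl_append]
  have hlen : (r.take 8).length = 8 := by simp; omega
  rw [foldl_stepA_small (r.take 8) 1 [] lns (by omega) (by rw [hlen]; norm_num)]
  have hd : r.drop 8 ≠ [] := by
    intro hnil
    have h0 : (List.drop 8 r).length = 0 := by rw [hnil]; rfl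
    rw [List.length_drop] at h0; omega
  cases hdrop : r.drop 8 with
  | nil => exact absurd hdrop hd
  | cons d ds =>
    simp only [List.foldl_cons]
    have h9 : (1 : Int) + ((r.take 8).length : Int) = 9 := by rw [hlen]; norm_num
    rw [h9]
    have hgt : ((9 : Int) > 8) := by norm_num
    have hng : ¬ ((1 : Int) > 8) := by norm_num
    simp only [pvStepA, if_pos hgt, if_neg hng, List.nil_append, pvRow]
    norm_num

-- full characterisation of A's grouping phase
theorem finish_stepA (n : Nat) : ∀ (r : List String), r.length ≤ n → ∀ (lns : List String),
    (if (r.foldl pvStepA (1, [], lns)).1 > 1 then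
        (r.foldl pvStepA (1, [], lns)).2.2 ++ ["     " ++ PySem.Str.join ", " (r.foldl pvStepA (1, [], lns)).2.1]
      else (r.foldl pvStepA (1, [], lns)).2.2)
    = lns ++ pvAddCommas (pvRowsB r) := by
  induction n with
  | zero =>
    intro r hr lns
    have hnil : r = [] := by
      cases r with
      | nil => rfl
      | cons a t => simp at hr
    subst hnil
    simp [pvRowsB_nil, pvAddCommas]
  | succ n ih =>
    intro r hr lns
    by_cases hnil : r = []
    · subst hnil; simp [pvRowsB_nil, pvAddCommas]
    · by_cases hlen : r.length ≤ 8
      · rw [foldl_stepA_small r 1 [] lns (by norm_num) (by push_cast; omega)]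
        have hpos : 0 < r.length := List.length_pos_of_ne_nil hnil
        have hgt : (1 : Int) + (r.length : Int) > 1 := by
          have : (0:Int) < (r.length : Int) := by exact_mod_cast hpos
          omega
        rw [if_pos hgt]
        have htake : r.take 8 = r := List.take_of_length_le hlen
        have hdropn : r.drop 8 = [] := List.drop_eq_nil_of_le hlen
        rw [pvRowsB_cons r hnil, htake, hdropn, pvRowsB_nil, pvAddCommas, pvRow]
        simp
      · push_cast at hlen
        rw [foldl_stepA_flush r lns (by omega)]
        have hdlen : (r.drop 8).length ≤ n := by rw [List.length_drop]; omega
        rw [ih (r.drop 8) hdlen (lns ++ [pvRow (r.take 8) ++ ","])]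
        have hdne : r.drop 8 ≠ [] := by
          intro hnil2
          have h0 : (List.drop 8 r).length = 0 := by rw [hnil2]; rfl
          rw [List.length_drop] at h0; omega
        rw [pvRowsB_cons r hnil]
        cases hrb : pvRowsB (r.drop 8) with
        | nil => exact absurd hrb (pvRowsB_ne_nil _ hdne)
        | cons z zs => simp [pvAddCommas]

-- the two parsing phases collect the same token list
theorem tokens_eq (l0 : String) (rest : List String) :
    (PySem.List.enumerate (l0 :: rest) 0).flatMap
        (fun p => PySem.Str.split₀ (pvFieldB (if p.1 = 0 then p.2 else PySem.Str.slice p.2 (some 7) none)))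
      = PySem.Str.split₀ (pvFieldA l0)
        ++ rest.flatMap (fun line => PySem.Str.split₀ (pvFieldA (PySem.Str.slice line (some 7) none))) := by
  rw [PySem.List.enumerate_cons]
  simp only [List.flatMap_cons]
  congr 1
  have key : ∀ (xs : List String) (s : Int), 1 ≤ s →
      (PySem.List.enumerate xs s).flatMap
          (fun p => PySem.Str.split₀ (pvFieldB (if p.1 = 0 then p.2 else PySem.Str.slice p.2 (some 7) none)))
        = xs.flatMap (fun line => PySem.Str.split₀ (pvFieldA (PySem.Str.slice line (some 7) none))) := by
    intro xs
    induction xs with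
    | nil => intro s _; simp [PySem.List.enumerate]
    | cons x t ih =>
      intro s hs
      rw [PySem.List.enumerate_cons]
      simp only [List.flatMap_cons]
      rw [if_neg (by omega), ih (s + 1) (by omega)]
      rfl
  exact key rest 1 (by norm_num)

-- ===== VERDICT (by name: the statement is the Claim_ definition above) =====
theorem bytes16To8hex_spec : Claim_equal_bytes16To8hex := by
  intro data _ hpre
  unfold Spec_bytes16To8hex bytes16To8hex bytes16To8hex_alt
  cases hls : PySem.Str.splitlines data with
  | nil => exact absurd hls hpre
  | cons l0 rest =>
    have hget : PySem.List.pyGet? (l0 :: rest) 0 = some l0 := by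
      rw [show ((0:Int)) = ((0:Nat):Int) from rfl, PySem.List.pyGet?_natCast]; rfl
    simp only [hget]
    have htokA : (if (l0 :: rest).length > 1 then
          (PySem.List.slice (l0 :: rest) (some 1) none).foldl
            (fun acc line => acc ++ PySem.Str.split₀ (pvFieldA (PySem.Str.slice line (some 7) none)))
            (PySem.Str.split₀ (pvFieldA l0))
        else PySem.Str.split₀ (pvFieldA l0))
        = PySem.Str.split₀ (pvFieldA l0)
          ++ rest.flatMap (fun line => PySem.Str.split₀ (pvFieldA (PySem.Str.slice line (some 7) none))) := by
      by_cases hlong : (l0 :: rest).length > 1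
      · rw [if_pos hlong, PySem.List.slice_from_one, PySem.List.foldl_append_eq_flatMap]
        rfl
      · rw [if_neg hlong]
        cases rest with
        | nil => simp
        | cons a t => exact absurd (by simp) hlong
    rw [htokA, tokens_eq l0 rest,
        finish_stepA _ _ (le_refl _) [], List.nil_append, join_addCommas]
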